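-- pv_equiv track=rewrite | github.com/Ashiq-am/Data-Structures-Algorithm | 1.Python Algorithms/6.Geometric Algorithms/1.Lines/Minimum lines to cover all points/Minimum lines to cover all points.py | minLinesToCoverPoints
-- ===== SOURCE A (Python) =====
-- def gcd(a, b):
--     if (b == 0):
--         return a
--     return gcd(b, a % b)
--
-- def getReducedForm(dy, dx):
--     g = gcd(abs(dy), abs(dx))
--
--     # get sign of result
--     sign = (dy < 0) ^ (dx < 0)
--
--     if (sign):
--         return (-abs(dy) // g, abs(dx) // g)
--     else:
--         return (abs(dy) // g, abs(dx) // g)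
--
-- def minLinesToCoverPoints(points, N, xO, yO):
--     # set to store slope as a pair
--     st = dict()
--     minLines = 0
--
--     # loop over all points once
--     for i in range(N):
--
--         # get x and y co-ordinate of current point
--         curX = points[i][0]
--         curY = points[i][1]
--
--         temp = getReducedForm(curY - yO, curX - xO)
--
--         # if this slope is not there in set,
--         # increase ans by 1 and insert in set
--         if (temp not in st):
--             st[temp] = 1
--             minLines += 1
--
--     return minLines
-- ===== SOURCE B (Python) =====
-- def gcd(a, b):
--     if (b == 0):
--         return a
--     return gcd(b, a % b)
--
-- def getReducedForm(dy, dx):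
--     g = gcd(abs(dy), abs(dx))
--     sign = (dy < 0) ^ (dx < 0)
--     if (sign):
--         return (-abs(dy) // g, abs(dx) // g)
--     else:
--         return (abs(dy) // g, abs(dx) // g)
--
-- def minLinesToCoverPoints(points, N, xO, yO):
--     # sort-then-sweep: collect the reduced slope of every point, sort the
--     # list, then count one line per block of equal adjacent slopes.
--     forms = [getReducedForm(points[i][1] - yO, points[i][0] - xO) for i in range(N)]
--     forms.sort()
--     count = 0
--     prev = None
--     for f in forms:
--         if f != prev:
--             count += 1
--         prev = f
--     return count
-- ===== Notes on version B (the rewrite author's own statement) =====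
-- stated objective: alternative
-- what changed: A dedups slopes on the fly with a hash-set (dict) inside the loop; B collects all reduced slopes into a list, sorts it, and counts blocks of equal adjacent elements in one sweep.
import Mathlib
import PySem

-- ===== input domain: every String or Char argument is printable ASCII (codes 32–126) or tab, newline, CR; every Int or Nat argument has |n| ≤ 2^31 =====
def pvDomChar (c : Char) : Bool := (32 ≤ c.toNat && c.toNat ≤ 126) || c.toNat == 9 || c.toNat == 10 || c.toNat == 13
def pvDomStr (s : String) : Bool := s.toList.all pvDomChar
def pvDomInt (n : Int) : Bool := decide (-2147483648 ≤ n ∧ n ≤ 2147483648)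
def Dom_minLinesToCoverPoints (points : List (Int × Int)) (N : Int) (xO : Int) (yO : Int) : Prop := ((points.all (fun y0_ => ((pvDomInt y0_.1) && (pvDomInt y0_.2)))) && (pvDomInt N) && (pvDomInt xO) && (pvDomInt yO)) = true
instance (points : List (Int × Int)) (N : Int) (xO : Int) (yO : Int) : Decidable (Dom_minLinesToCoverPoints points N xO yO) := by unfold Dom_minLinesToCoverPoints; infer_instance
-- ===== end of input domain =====

-- B replaces A's hash-set dedup loop by collect-all-forms / sort / count-adjacent-distinct-blocks (objective: alternative, same result).

-- ===== PORT A =====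
-- shared module helper gcd(a, b); terminates because |a % b| shrinks below |b|
def pyGcd (a b : Int) : Int :=
  if b = 0 then a else pyGcd b (PySem.Int.mod a b)
termination_by b.natAbs
decreasing_by
  rename_i hb
  rcases lt_or_gt_of_ne hb with h | h
  · have := PySem.Int.mod_neg_bounds a h
    omega
  · have h1 := PySem.Int.mod_nonneg a h
    have h2 := PySem.Int.mod_lt a h
    omega

-- shared module helper getReducedForm(dy, dx)
def getReducedFormL (dy dx : Int) : Int × Int :=
  let g := pyGcd |dy| |dx|
  let sign := (decide (dy < 0)).xor (decide (dx < 0))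
  if sign then (PySem.Int.floordiv (-|dy|) g, PySem.Int.floordiv |dx| g)
  else (PySem.Int.floordiv |dy| g, PySem.Int.floordiv |dx| g)

-- the body of A's `for i in range(N)` loop, state = (st, minLines)
def aBody (points : List (Int × Int)) (xO yO : Int)
    (st : PySem.Dict (Int × Int) Int × Int) (i : Int) :
    PySem.Dict (Int × Int) Int × Int :=
  let curX := (PySem.List.pyGetD points i (0, 0)).1
  let curY := (PySem.List.pyGetD points i (0, 0)).2
  let temp := getReducedFormL (curY - yO) (curX - xO)
  if st.1.contains temp = false then (st.1.insert temp 1, st.2 + 1) else st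

def minLinesToCoverPoints (points : List (Int × Int)) (N : Int) (xO : Int) (yO : Int) : Int :=
  ((PySem.List.pyRange 0 N 1).foldl (aBody points xO yO) (PySem.Dict.empty, 0)).2

-- ===== PORT B =====
-- the comprehension body of B: reduced form of points[i] seen from the origin point
def formOf (points : List (Int × Int)) (xO yO : Int) (i : Int) : Int × Int :=
  getReducedFormL ((PySem.List.pyGetD points i (0, 0)).2 - yO)
                  ((PySem.List.pyGetD points i (0, 0)).1 - xO)

-- the body of B's sweep: state = (count, prev)
def bStep (st : Int × Option (Int × Int)) (f : Int × Int) : Int × Option (Int × Int) :=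
  (if st.2 ≠ some f then st.1 + 1 else st.1, some f)

def minLinesToCoverPoints_alt (points : List (Int × Int)) (N : Int) (xO : Int) (yO : Int) : Int :=
  ((PySem.List.sorted2 ((PySem.List.pyRange 0 N 1).map (formOf points xO yO))
      (fun p => p.1) (fun p => p.2) false).foldl bStep (0, none)).1

-- ===== PRECONDITION & SPEC =====
-- Pre_ excludes exactly the inputs where Python A raises: N beyond len(points)
-- (IndexError) and a selected point equal to the origin (gcd = 0, ZeroDivisionError).
def Pre_minLinesToCoverPoints (points : List (Int × Int)) (N : Int) (xO : Int) (yO : Int) : Prop :=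
  N ≤ (points.length : Int) ∧ ∀ p ∈ points.take N.toNat, p ≠ (xO, yO)
instance (points : List (Int × Int)) (N : Int) (xO : Int) (yO : Int) : Decidable (Pre_minLinesToCoverPoints points N xO yO) := by unfold Pre_minLinesToCoverPoints; infer_instance

def pvWitness_minLinesToCoverPoints : (List (Int × Int)) × Int × Int × Int :=
  ([(1, 2), (2, 4), (3, 1)], 3, 0, 0)

def Spec_minLinesToCoverPoints (points : List (Int × Int)) (N : Int) (xO : Int) (yO : Int) (out : Int) : Prop := out = minLinesToCoverPoints_alt points N xO yO
instance (points : List (Int × Int)) (N : Int) (xO : Int) (yO : Int) (out : Int) : Decidable (Spec_minLinesToCoverPoints points N xO yO out) := by unfold Spec_minLinesToCoverPoints; infer_instance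

-- ===== CLAIM (what is proved, stated in full; the proofs are below) =====
def Claim_equal_minLinesToCoverPoints : Prop := ∀ (points : List (Int × Int)) (N : Int) (xO : Int) (yO : Int), Dom_minLinesToCoverPoints points N xO yO → Pre_minLinesToCoverPoints points N xO yO → Spec_minLinesToCoverPoints points N xO yO (minLinesToCoverPoints points N xO yO)

-- ===== LEMMAS AND PROOFS =====

-- A's fold counts the distinct elements not already among the dict's keys
lemma foldA (l : List (Int × Int)) (d : PySem.Dict (Int × Int) Int) (m : Int) :
    (l.foldl (fun st t =>
        if st.1.contains t = false then (st.1.insert t 1, st.2 + 1) else st) (d, m)).2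
      = m + ((l.toFinset \ d.keys.toFinset).card : Int) := by
  induction l generalizing d m with
  | nil => simp
  | cons a t ih =>
    simp only [List.foldl_cons]
    by_cases h : d.contains a = true
    · have ha : a ∈ d.keys := (PySem.Dict.contains_iff_mem_keys d a).mp h
      rw [if_neg (by simp [h]), ih d m]
      have : (a :: t).toFinset \ d.keys.toFinset = t.toFinset \ d.keys.toFinset := by
        ext x
        simp only [List.toFinset_cons, Finset.mem_sdiff, Finset.mem_insert, List.mem_toFinset]
        constructor
        · rintro ⟨h1 | h1, h2⟩
          · exact absurd (h1 ▸ ha) (by simpa using h2)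
          · exact ⟨h1, h2⟩
        · rintro ⟨h1, h2⟩; exact ⟨Or.inr h1, h2⟩
      rw [this]
    · have hf : d.contains a = false := by simpa using h
      have hna : a ∉ d.keys := fun hm =>
        h ((PySem.Dict.contains_iff_mem_keys d a).mpr hm)
      rw [if_pos hf, ih]
      have hk : (d.insert a 1).keys = d.keys ++ [a] :=
        PySem.Dict.keys_insert_of_not_contains d 1 hf
      have hset : t.toFinset \ (d.insert a 1).keys.toFinset
          = (t.toFinset \ d.keys.toFinset).erase a := by
        ext x
        simp only [hk, Finset.mem_sdiff, Finset.mem_erase, List.toFinset_append,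
          Finset.mem_union, List.mem_toFinset, List.toFinset_cons, List.toFinset_nil,
          Finset.mem_insert]
        tauto
      have hmain : (a :: t).toFinset \ d.keys.toFinset
          = insert a ((t.toFinset \ d.keys.toFinset).erase a) := by
        ext x
        simp only [List.toFinset_cons, Finset.mem_sdiff, Finset.mem_insert,
          Finset.mem_erase, List.mem_toFinset]
        constructor
        · rintro ⟨h1 | h1, h2⟩
          · exact Or.inl h1
          · by_cases hx : x = a
            · exact Or.inl hx
            · exact Or.inr ⟨hx, h1, h2⟩
        · rintro (h1 | ⟨h1, h2, h3⟩)
          · subst h1; exact ⟨Or.inl rfl, by simpa using hna⟩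
          · exact ⟨Or.inr h2, h3⟩
      rw [hset, hmain, Finset.card_insert_of_notMem (Finset.notMem_erase _ _)]
      push_cast
      ring

-- B's sweep over a nondecreasingly sorted list, once a previous element p
-- bounds the rest from below, counts the distinct elements other than p
lemma foldB_go (l : List (Int × Int)) (p : Int × Int) (m : Int)
    (hl : l.Pairwise (fun a b => toLex a ≤ toLex b))
    (hp : ∀ x ∈ l, toLex p ≤ toLex x) :
    (l.foldl bStep (m, some p)).1 = m + ((l.toFinset.erase p).card : Int) := by
  induction l generalizing p m with
  | nil => simp
  | cons a t ih =>
    have hpa : toLex p ≤ toLex a := hp a (List.mem_cons_self ..)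
    have htl := (List.pairwise_cons.mp hl).2
    have hta := (List.pairwise_cons.mp hl).1
    simp only [List.foldl_cons, bStep]
    by_cases hap : a = p
    · subst hap
      rw [if_neg (show ¬((some a : Option (Int × Int)) ≠ some a) by simp)]
      rw [ih a m htl hta]
      have hset : (a :: t).toFinset.erase a = t.toFinset.erase a := by
        ext x
        simp only [List.toFinset_cons, Finset.mem_erase, Finset.mem_insert, List.mem_toFinset]
        tauto
      rw [hset]
    · have hpa' : toLex p < toLex a :=
        lt_of_le_of_ne hpa (fun he => hap (toLex.injective he.symm))
      rw [if_pos (show (some p : Option (Int × Int)) ≠ some a by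
            simpa using fun he : p = a => hap he.symm)]
      rw [ih a (m + 1) htl hta]
      have hpt : p ∉ (a :: t).toFinset := by
        simp only [List.toFinset_cons, Finset.mem_insert, List.mem_toFinset]
        rintro (h1 | h1)
        · exact absurd (h1 ▸ hpa') (lt_irrefl _)
        · have h2 : toLex a ≤ toLex p := hta p h1
          exact hap (toLex.injective (le_antisymm h2 hpa))
      have h1 : (a :: t).toFinset.erase p = (a :: t).toFinset :=
        Finset.erase_eq_of_notMem hpt
      have h2 : (a :: t).toFinset = insert a (t.toFinset.erase a) := by
        ext x
        simp only [List.toFinset_cons, Finset.mem_insert, Finset.mem_erase, List.mem_toFinset]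
        constructor
        · rintro (hx | hx)
          · exact Or.inl hx
          · by_cases hxa : x = a
            · exact Or.inl hxa
            · exact Or.inr ⟨hxa, hx⟩
        · rintro (hx | ⟨_, hx⟩)
          · exact Or.inl hx
          · exact Or.inr hx
      rw [h1, h2, Finset.card_insert_of_notMem (Finset.notMem_erase _ _)]
      push_cast
      ring

-- B's sweep over a sorted list counts the distinct elements
lemma foldB (l : List (Int × Int))
    (hl : l.Pairwise (fun a b => toLex a ≤ toLex b)) :
    (l.foldl bStep (0, none)).1 = (l.toFinset.card : Int) := by
  cases l with
  | nil => simp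
  | cons a t =>
    simp only [List.foldl_cons, bStep]
    rw [if_pos (show (none : Option (Int × Int)) ≠ some a by simp)]
    rw [foldB_go t a (0 + 1) (List.pairwise_cons.mp hl).2 (List.pairwise_cons.mp hl).1]
    have h2 : (a :: t).toFinset = insert a (t.toFinset.erase a) := by
      ext x
      simp only [List.toFinset_cons, Finset.mem_insert, Finset.mem_erase, List.mem_toFinset]
      constructor
      · rintro (hx | hx)
        · exact Or.inl hx
        · by_cases hxa : x = a
          · exact Or.inl hxa
          · exact Or.inr ⟨hxa, hx⟩
      · rintro (hx | ⟨_, hx⟩)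
        · exact Or.inl hx
        · exact Or.inr hx
    rw [h2, Finset.card_insert_of_notMem (Finset.notMem_erase _ _)]
    push_cast
    ring

-- Python's two-component tuple sort is the sort by the lexicographic key
lemma sorted2_eq_sorted_toLex (xs : List (Int × Int)) :
    PySem.List.sorted2 xs (fun p => p.1) (fun p => p.2) false
      = PySem.List.sorted xs (fun p => toLex p) false := by
  have h1 : PySem.List.sorted2 xs (fun p => p.1) (fun p => p.2) false
      = xs.foldl (fun acc x => PySem.List.insertBy
          (fun a b => decide (a.1 < b.1) || (!decide (b.1 < a.1) && decide (a.2 < b.2)))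
          x acc) [] := rfl
  rw [h1, PySem.List.sorted_eq_foldl_insertBy]
  have hfun : (fun (a b : Int × Int) =>
        decide (a.1 < b.1) || (!decide (b.1 < a.1) && decide (a.2 < b.2)))
      = fun (a b : Int × Int) => decide (toLex a < toLex b) := by
    funext a b
    rw [Bool.eq_iff_iff]
    simp only [Bool.or_eq_true, Bool.and_eq_true, Bool.not_eq_true',
      decide_eq_true_eq, decide_eq_false_iff_not, Prod.Lex.lt_iff, ofLex_toLex]
    constructor
    · rintro (h | ⟨h1, h2⟩)
      · exact Or.inl h
      · rcases lt_or_eq_of_le (not_lt.mp h1) with h | h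
        · exact Or.inl h
        · exact Or.inr ⟨h, h2⟩
    · rintro (h | ⟨h1, h2⟩)
      · exact Or.inl h
      · exact Or.inr ⟨by omega, h2⟩
  rw [hfun]

-- ===== VERDICT (by name: the statement is the Claim_ definition above) =====
theorem minLinesToCoverPoints_spec : Claim_equal_minLinesToCoverPoints := by
  intro points N xO yO _ _
  unfold Spec_minLinesToCoverPoints minLinesToCoverPoints minLinesToCoverPoints_alt
  have hA : (PySem.List.pyRange 0 N 1).foldl (aBody points xO yO) (PySem.Dict.empty, 0)
      = ((PySem.List.pyRange 0 N 1).map (formOf points xO yO)).foldl (fun st t =>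
          if st.1.contains t = false then (st.1.insert t 1, st.2 + 1) else st)
          (PySem.Dict.empty, 0) := by
    rw [List.foldl_map]
    rfl
  rw [hA, foldA, sorted2_eq_sorted_toLex,
    foldB _ (PySem.List.sorted_pairwise ((PySem.List.pyRange 0 N 1).map (formOf points xO yO))
      (fun p => toLex p)),
    List.toFinset_eq_of_perm _ _
      (PySem.List.sorted_perm ((PySem.List.pyRange 0 N 1).map (formOf points xO yO))
        (fun p => toLex p) false)]
  simp [PySem.Dict.keys_empty]
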